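-- pv_equiv track=rewrite | github.com/jbw/watt-trader | watt_trader/domain/trader_trs.py | get_all_traders_first_tr_ids
-- ===== SOURCE A (Python) =====
-- TRADERS_MIN = 0
--
-- TRADERS_TOTAL = 7
--
-- TRADERS_NEXT_TR_INCREMENT = 7
--
-- FIRST_TR_MAX = 49
--
-- FIRST_TR_MIN = 0
--
-- FIRST_TR_TOTAL = 50
--
-- def get_all_traders_first_tr_ids(in_game_trader_first_tr_id):
--
--     if in_game_trader_first_tr_id > FIRST_TR_MAX:
--         raise Exception("TR ID max is: ", FIRST_TR_MAX)
--     if in_game_trader_first_tr_id < FIRST_TR_MIN: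
--         raise Exception("TR ID min is: ", FIRST_TR_MIN)
--
--     all = {}
--
--     for trader_id in range(TRADERS_MIN, TRADERS_TOTAL, 1):
--         all[trader_id] = _get_traders_first_tr_id(trader_id, in_game_trader_first_tr_id)
--
--     return all
--
-- def _get_traders_first_tr_id(trader_id, in_game_trader_first_tr_id):
--
--     tr_id_for_trader_id = in_game_trader_first_tr_id
--
--     trader_id_start = 0
--     while trader_id_start < trader_id:
--         tr_id_for_trader_id = _get_next_first_tr_id(tr_id_for_trader_id)
--         trader_id_start += 1
--
--     return tr_id_for_trader_id
--
-- def _get_next_first_tr_id(first_tr_id):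
--
--     total = first_tr_id + TRADERS_NEXT_TR_INCREMENT
--
--     if total >= FIRST_TR_MAX:
--         total -= FIRST_TR_TOTAL
--
--     return total
-- ===== SOURCE B (Python) =====
-- TRADERS_MIN = 0
-- TRADERS_TOTAL = 7
-- TRADERS_NEXT_TR_INCREMENT = 7
-- FIRST_TR_MAX = 49
-- FIRST_TR_MIN = 0
-- FIRST_TR_TOTAL = 50
--
-- def get_all_traders_first_tr_ids(in_game_trader_first_tr_id):
--     if in_game_trader_first_tr_id > FIRST_TR_MAX:
--         raise Exception("TR ID max is: ", FIRST_TR_MAX)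
--     if in_game_trader_first_tr_id < FIRST_TR_MIN:
--         raise Exception("TR ID min is: ", FIRST_TR_MIN)
--     # single forward pass: one running accumulator instead of recomputing from zero
--     all_ids = {0: in_game_trader_first_tr_id}
--     current = in_game_trader_first_tr_id
--     for trader_id in range(1, TRADERS_TOTAL):
--         current += TRADERS_NEXT_TR_INCREMENT
--         if current >= FIRST_TR_MAX:
--             current -= FIRST_TR_TOTAL
--         all_ids[trader_id] = current
--     return all_ids
-- ===== Notes on version B (the rewrite author's own statement) =====
-- stated objective: simpler
-- what changed: B computes the dict in one forward pass with a running accumulator applying the +7/wrap step once per trader, instead of A's nested loop that recomputes each trader's value from the start.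
import Mathlib
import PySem

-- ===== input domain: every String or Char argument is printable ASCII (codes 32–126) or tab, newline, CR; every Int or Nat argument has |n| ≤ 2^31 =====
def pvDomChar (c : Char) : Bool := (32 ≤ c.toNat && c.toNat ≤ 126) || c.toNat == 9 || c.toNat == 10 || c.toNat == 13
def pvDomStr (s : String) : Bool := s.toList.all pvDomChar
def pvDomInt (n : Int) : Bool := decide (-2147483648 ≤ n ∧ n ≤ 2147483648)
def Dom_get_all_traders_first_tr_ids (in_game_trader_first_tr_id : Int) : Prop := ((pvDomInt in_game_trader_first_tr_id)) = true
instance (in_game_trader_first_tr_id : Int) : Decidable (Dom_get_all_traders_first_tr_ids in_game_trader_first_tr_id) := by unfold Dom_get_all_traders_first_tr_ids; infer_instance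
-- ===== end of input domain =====

-- B builds the dict in one forward pass with a running accumulator instead of
-- A's nested recompute-from-zero loop (objective: simpler).


-- ===== PORT A =====
-- total = first_tr_id + 7; if total >= 49: total -= 50
def pvA_get_next_first_tr_id (first_tr_id : Int) : Int :=
  let total := first_tr_id + 7
  if total ≥ 49 then total - 50 else total

-- while trader_id_start < trader_id: apply step (counted loop, fuel = trader_id)
def pvA_stepLoop : Nat → Int → Int
  | 0, v => v
  | n + 1, v => pvA_stepLoop n (pvA_get_next_first_tr_id v)

def pvA_get_traders_first_tr_id (trader_id : Int) (in_game_trader_first_tr_id : Int) : Int :=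
  pvA_stepLoop trader_id.toNat in_game_trader_first_tr_id

-- on inputs where Python raises (x > 49 or x < 0) the port returns []; Pre_ excludes them
def get_all_traders_first_tr_ids (in_game_trader_first_tr_id : Int) : List (Int × Int) :=
  if in_game_trader_first_tr_id > 49 then []
  else if in_game_trader_first_tr_id < 0 then []
  else
    ((PySem.List.pyRange 0 7 1).foldl
      (fun all trader_id =>
        PySem.Dict.insert all trader_id (pvA_get_traders_first_tr_id trader_id in_game_trader_first_tr_id))
      (PySem.Dict.mk ([] : List (Int × Int)))).items

-- ===== PORT B =====
-- one forward pass: running accumulator `current`, stepped once per trader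
def get_all_traders_first_tr_ids_alt (in_game_trader_first_tr_id : Int) : List (Int × Int) :=
  if in_game_trader_first_tr_id > 49 then []
  else if in_game_trader_first_tr_id < 0 then []
  else
    let init : PySem.Dict Int Int × Int :=
      (PySem.Dict.insert (PySem.Dict.mk ([] : List (Int × Int))) 0 in_game_trader_first_tr_id,
       in_game_trader_first_tr_id)
    let res := (PySem.List.pyRange 1 7 1).foldl
      (fun (st : PySem.Dict Int Int × Int) trader_id =>
        let cur := st.2 + 7
        let cur := if cur ≥ 49 then cur - 50 else cur
        (PySem.Dict.insert st.1 trader_id cur, cur)) init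
    res.1.items

-- ===== PRECONDITION & SPEC =====
-- Python A raises on in_game_trader_first_tr_id > 49 or < 0; Pre_ admits exactly the rest.
def Pre_get_all_traders_first_tr_ids (in_game_trader_first_tr_id : Int) : Prop :=
  0 ≤ in_game_trader_first_tr_id ∧ in_game_trader_first_tr_id ≤ 49
instance (in_game_trader_first_tr_id : Int) : Decidable (Pre_get_all_traders_first_tr_ids in_game_trader_first_tr_id) := by unfold Pre_get_all_traders_first_tr_ids; infer_instance
def pvWitness_get_all_traders_first_tr_ids : Int := (3)

def Spec_get_all_traders_first_tr_ids (in_game_trader_first_tr_id : Int) (out : List (Int × Int)) : Prop := out = get_all_traders_first_tr_ids_alt in_game_trader_first_tr_id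
instance (in_game_trader_first_tr_id : Int) (out : List (Int × Int)) : Decidable (Spec_get_all_traders_first_tr_ids in_game_trader_first_tr_id out) := by unfold Spec_get_all_traders_first_tr_ids; infer_instance

-- ===== CLAIM (what is proved, stated in full; the proofs are below) =====
def Claim_equal_get_all_traders_first_tr_ids : Prop := ∀ (in_game_trader_first_tr_id : Int), Dom_get_all_traders_first_tr_ids in_game_trader_first_tr_id → Pre_get_all_traders_first_tr_ids in_game_trader_first_tr_id → Spec_get_all_traders_first_tr_ids in_game_trader_first_tr_id (get_all_traders_first_tr_ids in_game_trader_first_tr_id)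

-- ===== LEMMAS AND PROOFS =====

-- ===== VERDICT (by name: the statement is the Claim_ definition above) =====
theorem get_all_traders_first_tr_ids_spec : Claim_equal_get_all_traders_first_tr_ids := by
  intro x _ hPre
  obtain ⟨h0, h49⟩ := hPre
  unfold Spec_get_all_traders_first_tr_ids
  interval_cases x <;> decide
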